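-- pv_equiv track=rewrite | github.com/sacRedeeRhoRn/agents-inc | src/agents_inc/core/orchestrator_reply.py | _normalize_resume_cycle_summaries
-- ===== SOURCE A (Python) =====
-- from typing import Callable, Dict, List, Optional, Tuple
--
-- def _normalize_resume_cycle_summaries(
--     resume_rows: List[dict] | None,
-- ) -> Tuple[List[dict], int]:
--     rows: List[dict] = []
--     max_cycle_id = 0
--     if not isinstance(resume_rows, list):
--         return rows, max_cycle_id
--     for item in resume_rows:
--         if not isinstance(item, dict):
--             continue
--         copied = dict(item)
--         rows.append(copied)
--         try:
--             cycle_id = int(copied.get("cycle_id", 0) or 0)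
--         except Exception:
--             cycle_id = 0
--         if cycle_id > max_cycle_id:
--             max_cycle_id = cycle_id
--     return rows, max_cycle_id
-- ===== SOURCE B (Python) =====
-- from typing import List, Tuple
--
--
-- def _normalize_resume_cycle_summaries(
--     resume_rows: List[dict] | None,
-- ) -> Tuple[List[dict], int]:
--     if not isinstance(resume_rows, list):
--         return [], 0
--     return _conquer(resume_rows)
--
--
-- def _conquer(items: list) -> Tuple[List[dict], int]:
--     # divide and conquer: split in half, solve each half, merge the results
--     n = len(items)
--     if n == 0:
--         return [], 0
--     if n == 1:
--         item = items[0]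
--         if not isinstance(item, dict):
--             return [], 0
--         copied = dict(item)
--         try:
--             cid = int(copied.get("cycle_id", 0) or 0)
--         except Exception:
--             cid = 0
--         return [copied], cid if cid > 0 else 0
--     mid = n // 2
--     lrows, lmax = _conquer(items[:mid])
--     rrows, rmax = _conquer(items[mid:])
--     return lrows + rrows, lmax if lmax > rmax else rmax
-- ===== Notes on version B (the rewrite author's own statement) =====
-- stated objective: alternative
-- what changed: Replaces A's single fused left-to-right loop with a mutable (rows, max) accumulator by a divide-and-conquer recursion: split the list in half, solve each half independently, and merge by list concatenation and a pairwise max (correct because both concatenation and max are associative).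
import Mathlib
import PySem

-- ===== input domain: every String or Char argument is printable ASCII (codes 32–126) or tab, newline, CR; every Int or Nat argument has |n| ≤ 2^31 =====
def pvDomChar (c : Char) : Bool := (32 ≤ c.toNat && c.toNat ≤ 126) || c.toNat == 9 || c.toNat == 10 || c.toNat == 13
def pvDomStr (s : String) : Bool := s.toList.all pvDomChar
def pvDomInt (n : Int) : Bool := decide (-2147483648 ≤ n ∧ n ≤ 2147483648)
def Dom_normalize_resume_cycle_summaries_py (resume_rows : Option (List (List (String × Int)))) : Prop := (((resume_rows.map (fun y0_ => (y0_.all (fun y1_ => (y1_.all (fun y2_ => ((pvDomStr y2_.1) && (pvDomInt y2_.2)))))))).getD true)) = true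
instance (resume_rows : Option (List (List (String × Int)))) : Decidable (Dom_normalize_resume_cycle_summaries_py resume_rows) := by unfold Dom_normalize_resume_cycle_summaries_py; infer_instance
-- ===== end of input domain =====

-- B replaces A's fused left-to-right loop (mutable rows + running max) by a divide-and-conquer
-- recursion that splits the list in half and merges with ++ and pairwise max; objective: alternative.

-- shared helper: cycle_id = int(row.get("cycle_id", 0) or 0); on an Int value, `or 0` and
-- int() are the identity (v or 0 is v when v ≠ 0 and 0 when v = 0), and int() never raises,
-- so this is exactly the association-list lookup with default 0 (first match, per convention).
def pvCycleId (r : List (String × Int)) : Int :=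
  (PySem.Dict.mk r).getD "cycle_id" 0

-- ===== PORT A =====
-- the typed domain makes isinstance(item, dict) always true and dict(item) an identity copy,
-- so the loop body keeps every item and updates the running max.
def normalize_resume_cycle_summaries_py (resume_rows : Option (List (List (String × Int)))) : (List (List (String × Int))) × Int :=
  match resume_rows with
  | none => ([], 0)      -- not isinstance(resume_rows, list)
  | some l =>
    l.foldl (fun acc item =>
      let copied := item
      let cycle_id := pvCycleId copied
      (acc.1 ++ [copied], if cycle_id > acc.2 then cycle_id else acc.2))
      (([] : List (List (String × Int))), (0 : Int))

-- ===== PORT B =====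
-- _conquer of Source B: split at len//2 (Nat division = Python // on nonnegative lengths),
-- recurse on the two slices items[:mid] / items[mid:] (= take/drop), merge with ++ and max.
def pvConquer : List (List (String × Int)) → (List (List (String × Int))) × Int
  | [] => ([], 0)
  | [item] =>
    let copied := item
    let cid := pvCycleId copied
    ([copied], if cid > 0 then cid else 0)
  | a :: b :: t =>
    let items := a :: b :: t
    let mid := items.length / 2
    let lr := pvConquer (items.take mid)
    let rr := pvConquer (items.drop mid)
    (lr.1 ++ rr.1, if lr.2 > rr.2 then lr.2 else rr.2)
  termination_by l => l.length
  decreasing_by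
  · simp only [List.length_take, List.length_cons]; omega
  · simp only [List.length_drop, List.length_cons]; omega

def normalize_resume_cycle_summaries_py_alt (resume_rows : Option (List (List (String × Int)))) : (List (List (String × Int))) × Int :=
  match resume_rows with
  | none => ([], 0)
  | some l => pvConquer l

-- ===== PRECONDITION & SPEC =====
def Spec_normalize_resume_cycle_summaries_py (resume_rows : Option (List (List (String × Int)))) (out : (List (List (String × Int))) × Int) : Prop := out = normalize_resume_cycle_summaries_py_alt resume_rows
instance (resume_rows : Option (List (List (String × Int)))) (out : (List (List (String × Int))) × Int) : Decidable (Spec_normalize_resume_cycle_summaries_py resume_rows out) := by unfold Spec_normalize_resume_cycle_summaries_py; infer_instance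

-- ===== CLAIM (what is proved, stated in full; the proofs are below) =====
def Claim_equal_normalize_resume_cycle_summaries_py : Prop := ∀ (resume_rows : Option (List (List (String × Int)))), Dom_normalize_resume_cycle_summaries_py resume_rows → Spec_normalize_resume_cycle_summaries_py resume_rows (normalize_resume_cycle_summaries_py resume_rows)

-- ===== LEMMAS AND PROOFS =====

-- A's fold appends its items to the row accumulator and keeps a running max of the cycle ids.
theorem pvFoldA_char (l : List (List (String × Int))) (rows : List (List (String × Int))) (m : Int) :
    l.foldl (fun acc item =>
      let copied := item
      let cycle_id := pvCycleId copied
      (acc.1 ++ [copied], if cycle_id > acc.2 then cycle_id else acc.2)) (rows, m)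
    = (rows ++ l, (l.map pvCycleId).foldl max m) := by
  induction l generalizing rows m with
  | nil => simp
  | cons x t ih =>
    simp only [List.foldl_cons, List.map_cons, ih]
    refine Prod.ext ?_ ?_ <;> simp only
    · simp
    · congr 1
      by_cases h : pvCycleId x > m
      · simp [h, max_eq_right (le_of_lt h)]
      · simp [h, max_eq_left (le_of_not_gt h)]

theorem pvFoldMax_nonneg (c : List Int) (m : Int) (hm : 0 ≤ m) : 0 ≤ c.foldl max m := by
  induction c generalizing m with
  | nil => exact hm
  | cons x t ih => exact ih _ (le_trans hm (le_max_left _ _))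

theorem pvFoldMax_init (c : List Int) (m : Int) (hm : 0 ≤ m) :
    c.foldl max m = max m (c.foldl max 0) := by
  induction c generalizing m with
  | nil => simp [max_eq_left hm]
  | cons x t ih =>
    simp only [List.foldl_cons]
    rw [ih _ (le_trans hm (le_max_left _ _)), ih (max 0 x) (le_max_left _ _),
      ← max_assoc, ← max_assoc m 0 x, max_eq_left hm]

-- B's divide-and-conquer computes the identity on rows and the 0-floored max of the cycle ids.
theorem pvConquer_char (l : List (List (String × Int))) :
    pvConquer l = (l, (l.map pvCycleId).foldl max 0) := by
  induction l using pvConquer.induct with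
  | case1 => simp [pvConquer]
  | case2 item =>
    simp only [pvConquer, List.map_cons, List.map_nil, List.foldl_cons, List.foldl_nil]
    by_cases h : pvCycleId item > 0
    · simp [h, max_eq_right (le_of_lt h)]
    · simp [h, max_eq_left (le_of_not_gt h)]
  | case3 a b t items mid ihl ihr =>
    rw [pvConquer, ihl, ihr]
    refine Prod.ext ?_ ?_ <;> simp only
    · exact List.take_append_drop _ _
    · conv_rhs => rw [← List.take_append_drop ((a :: b :: t).length / 2) (a :: b :: t)]
      rw [List.map_append, List.foldl_append,
        pvFoldMax_init _ _ (pvFoldMax_nonneg _ 0 le_rfl)]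
      set L := (((a :: b :: t).take ((a :: b :: t).length / 2)).map pvCycleId).foldl max 0
      set R := (((a :: b :: t).drop ((a :: b :: t).length / 2)).map pvCycleId).foldl max 0
      by_cases h : L > R
      · simp [h, max_eq_left (le_of_lt h)]
      · simp [h, max_eq_right (le_of_not_gt h)]

-- ===== VERDICT (by name: the statement is the Claim_ definition above) =====
theorem normalize_resume_cycle_summaries_py_spec : Claim_equal_normalize_resume_cycle_summaries_py := by
  intro resume_rows _
  unfold Spec_normalize_resume_cycle_summaries_py
  cases resume_rows with
  | none => rfl
  | some l =>
    simp only [normalize_resume_cycle_summaries_py, normalize_resume_cycle_summaries_py_alt,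
      pvFoldA_char, pvConquer_char, List.nil_append]
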